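-- pv_equiv track=rewrite | github.com/stenknutsen/HomeGrownPOSTagger | PhaseFourTagging.py | IN_N_UNK_PUNC_Tagger
-- ===== SOURCE A (Python) =====
-- def IN_N_UNK_PUNC_Tagger(sent):
--     sentToReturn = []
--     skip = 0
--
--     for i in range(len(sent)):
--
--         if skip>0:
--             skip = skip -1
--             continue
--
--
--         if (i)<0 | (i+3)>=len(sent):
--             sentToReturn += [sent[i]]
--             continue
--
--         leftContext = sent[i]
--         leftTarget = sent[i+1]
--         rightTarget = sent[i+2]
--         rightContext = sent[i+3]
--
--
--         if ((leftContext[1]=="IN")|(leftContext[1]=="PRP$"))&(leftTarget[1].startswith("N"))&(rightTarget[1]=="UNK")&((rightContext[1]==".")|(rightContext[1]==";")):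
--
--             sentToReturn += [leftContext]
--
--
--             sentToReturn += [leftTarget]
--
--             newTup = (rightTarget[0], "N")
--             sentToReturn += [newTup]
--
--             sentToReturn += [rightContext]
--             skip = 3
--
--         else:
--             sentToReturn += [leftContext]
--
--     return sentToReturn
-- ===== SOURCE B (Python) =====
-- def IN_N_UNK_PUNC_Tagger(sent):
--     # Pass 1: greedy left-to-right scan collecting the positions to retag.
--     n = len(sent)
--     retag = set()
--     i = 0
--     while i + 3 < n:
--         if ((sent[i][1] == "IN" or sent[i][1] == "PRP$")
--                 and sent[i + 1][1].startswith("N")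
--                 and sent[i + 2][1] == "UNK"
--                 and (sent[i + 3][1] == "." or sent[i + 3][1] == ";")):
--             retag.add(i + 2)
--             i += 4
--         else:
--             i += 1
--     # Pass 2: emit every token, retagging the collected positions to "N".
--     return [(tok[0], "N") if j in retag else tok for j, tok in enumerate(sent)]
-- ===== Notes on version B (the rewrite author's own statement) =====
-- stated objective: alternative
-- what changed: A's single pass with a skip counter that interleaves window-testing and output-building is replaced by two passes: a greedy scan that collects the retag positions into a set, then an enumerate-map that rewrites exactly those positions.
import Mathlib
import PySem

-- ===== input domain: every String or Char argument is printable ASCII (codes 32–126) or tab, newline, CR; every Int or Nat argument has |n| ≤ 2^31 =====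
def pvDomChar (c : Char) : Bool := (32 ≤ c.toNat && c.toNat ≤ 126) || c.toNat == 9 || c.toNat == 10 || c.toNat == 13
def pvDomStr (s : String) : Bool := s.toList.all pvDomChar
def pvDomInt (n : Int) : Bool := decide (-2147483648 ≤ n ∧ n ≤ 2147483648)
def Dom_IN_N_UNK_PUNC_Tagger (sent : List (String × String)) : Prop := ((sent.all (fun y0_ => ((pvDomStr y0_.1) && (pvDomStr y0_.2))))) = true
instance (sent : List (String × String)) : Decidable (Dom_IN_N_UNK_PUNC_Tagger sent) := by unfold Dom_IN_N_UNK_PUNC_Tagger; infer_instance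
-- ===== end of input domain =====

-- B replaces A's single skip-counter loop by two passes (greedy scan collecting retag
-- positions into a set, then a position-indexed map over the tokens); objective: alternative.


-- The IN/PRP$ + N* + UNK + ./; window test, shared verbatim by both sources.
def pvPat4 (a b c d : String × String) : Bool :=
  (a.2 == "IN" || a.2 == "PRP$") && PySem.Str.startswith b.2 "N" &&
    (c.2 == "UNK") && (d.2 == "." || d.2 == ";")

-- ===== PORT A =====
-- A's for-loop over range(len(sent)) with the skip counter, transcribed as recursion over
-- the index list.  Python's '(i)<0 | (i+3)>=len(sent)' parses as the chained comparison
-- i < (0 | (i+3)) >= len(sent); it is transcribed literally (0 ||| (i+3) is Python's 0|(i+3)).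
-- All indexings sent[i..i+3] are provably in range there, so List.getD is exact.
def pvALoop (sent : List (String × String)) :
    List Nat → List (String × String) → Nat → List (String × String)
  | [], out, _ => out
  | i :: is, out, skip =>
    if skip > 0 then pvALoop sent is out (skip - 1)
    else if i < (0 ||| (i + 3)) ∧ (0 ||| (i + 3)) ≥ sent.length then
      pvALoop sent is (out ++ [sent.getD i ("", "")]) skip
    else
      let leftContext := sent.getD i ("", "")
      let leftTarget := sent.getD (i + 1) ("", "")
      let rightTarget := sent.getD (i + 2) ("", "")
      let rightContext := sent.getD (i + 3) ("", "")
      if pvPat4 leftContext leftTarget rightTarget rightContext then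
        pvALoop sent is (out ++ [leftContext] ++ [leftTarget] ++ [(rightTarget.1, "N")] ++ [rightContext]) 3
      else
        pvALoop sent is (out ++ [leftContext]) skip

def IN_N_UNK_PUNC_Tagger (sent : List (String × String)) : List (String × String) :=
  pvALoop sent (List.range sent.length) [] 0

-- ===== PORT B =====
-- Pass 1 of Source B: the greedy while-loop collecting retag positions into a set.
def pvBScan (sent : List (String × String)) (i : Nat) (retag : PySem.Set Int) : PySem.Set Int :=
  if i + 3 < sent.length then
    if pvPat4 (sent.getD i ("", "")) (sent.getD (i + 1) ("", ""))
        (sent.getD (i + 2) ("", "")) (sent.getD (i + 3) ("", "")) then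
      pvBScan sent (i + 4) (retag.add ((i : Int) + 2))
    else
      pvBScan sent (i + 1) retag
  else retag
  termination_by sent.length - i

-- Pass 2 of Source B: the comprehension over enumerate(sent).
def IN_N_UNK_PUNC_Tagger_alt (sent : List (String × String)) : List (String × String) :=
  let retag := pvBScan sent 0 PySem.Set.empty
  (PySem.List.enumerate sent 0).map
    (fun jt => if retag.contains jt.1 then (jt.2.1, "N") else jt.2)

-- ===== PRECONDITION & SPEC =====
def Spec_IN_N_UNK_PUNC_Tagger (sent : List (String × String)) (out : List (String × String)) : Prop := out = IN_N_UNK_PUNC_Tagger_alt sent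
instance (sent : List (String × String)) (out : List (String × String)) : Decidable (Spec_IN_N_UNK_PUNC_Tagger sent out) := by unfold Spec_IN_N_UNK_PUNC_Tagger; infer_instance

-- ===== CLAIM (what is proved, stated in full; the proofs are below) =====
def Claim_equal_IN_N_UNK_PUNC_Tagger : Prop := ∀ (sent : List (String × String)), Dom_IN_N_UNK_PUNC_Tagger sent → Spec_IN_N_UNK_PUNC_Tagger sent (IN_N_UNK_PUNC_Tagger sent)

-- ===== LEMMAS AND PROOFS =====

-- The common reference function: greedy non-overlapping window rewriting.
def pvG : List (String × String) → List (String × String)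
  | a :: b :: c :: d :: rest =>
    if pvPat4 a b c d then a :: b :: (c.1, "N") :: d :: pvG rest
    else a :: pvG (b :: c :: d :: rest)
  | s => s
  termination_by s => s.length

lemma pvG_cons4 (a b c d : String × String) (rest : List (String × String)) :
    pvG (a :: b :: c :: d :: rest) =
      if pvPat4 a b c d then a :: b :: (c.1, "N") :: d :: pvG rest
      else a :: pvG (b :: c :: d :: rest) := by
  rw [pvG]

lemma pvG_short (s : List (String × String)) (h : s.length ≤ 3) : pvG s = s := by
  match s with
  | [] => rw [pvG]; intros; simp_all
  | [a] => rw [pvG]; intros; simp_all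
  | [a, b] => rw [pvG]; intros; simp_all
  | [a, b, c] => rw [pvG]; intros; simp_all

lemma pvGetD_append {α : Type} (pre suf : List α) (j : Nat) (d : α) :
    (pre ++ suf).getD (pre.length + j) d = suf.getD j d := by
  simp [List.getD, List.getElem?_append_right (by omega : pre.length ≤ pre.length + j)]

-- one-step unfoldings of A's loop
lemma pvALoop_skip (sent : List (String × String)) (i : Nat) (is : List Nat)
    (out : List (String × String)) (skip : Nat) (h : skip > 0) :
    pvALoop sent (i :: is) out skip = pvALoop sent is out (skip - 1) := by
  rw [pvALoop, if_pos h]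

lemma pvALoop_bound (sent : List (String × String)) (i : Nat) (is : List Nat)
    (out : List (String × String)) (h : sent.length ≤ i + 3) :
    pvALoop sent (i :: is) out 0 = pvALoop sent is (out ++ [sent.getD i ("", "")]) 0 := by
  rw [pvALoop, if_neg (by omega), if_pos (by simp only [Nat.zero_or]; omega)]

lemma pvALoop_match (sent : List (String × String)) (i : Nat) (is : List Nat)
    (out : List (String × String)) (h : i + 3 < sent.length)
    (hp : pvPat4 (sent.getD i ("", "")) (sent.getD (i + 1) ("", ""))
      (sent.getD (i + 2) ("", "")) (sent.getD (i + 3) ("", "")) = true) :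
    pvALoop sent (i :: is) out 0 =
      pvALoop sent is (out ++ [sent.getD i ("", "")] ++ [sent.getD (i + 1) ("", "")] ++
        [((sent.getD (i + 2) ("", "")).1, "N")] ++ [sent.getD (i + 3) ("", "")]) 3 := by
  rw [pvALoop, if_neg (by omega), if_neg (by simp only [Nat.zero_or]; omega)]
  show (if pvPat4 _ _ _ _ then _ else _) = _
  rw [if_pos hp]

lemma pvALoop_nomatch (sent : List (String × String)) (i : Nat) (is : List Nat)
    (out : List (String × String)) (h : i + 3 < sent.length)
    (hp : ¬ pvPat4 (sent.getD i ("", "")) (sent.getD (i + 1) ("", ""))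
      (sent.getD (i + 2) ("", "")) (sent.getD (i + 3) ("", "")) = true) :
    pvALoop sent (i :: is) out 0 = pvALoop sent is (out ++ [sent.getD i ("", "")]) 0 := by
  rw [pvALoop, if_neg (by omega), if_neg (by simp only [Nat.zero_or]; omega)]
  show (if pvPat4 _ _ _ _ then _ else _) = _
  rw [if_neg hp]

-- A's loop, started at index pre.length with skip 0, appends pvG suf.
lemma pvA_loop_eq (n : Nat) : ∀ (suf : List (String × String)), suf.length ≤ n →
    ∀ (pre out : List (String × String)),
      pvALoop (pre ++ suf) (List.range' pre.length suf.length) out 0 = out ++ pvG suf := by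
  induction n with
  | zero =>
    intro suf h pre out
    rw [List.length_eq_zero_iff.mp (Nat.le_zero.mp h)]
    simp [pvALoop, pvG_short]
  | succ n ih =>
    intro suf h pre out
    by_cases hs : suf.length ≤ 3
    · -- short tail: every remaining index takes the boundary branch
      have hall : ∀ (l : List (String × String)), l.length ≤ 3 →
          ∀ (q out' : List (String × String)),
          pre ++ suf = q ++ l → q.length + l.length = (pre ++ suf).length →
          pvALoop (pre ++ suf) (List.range' q.length l.length) out' 0 = out' ++ l := by
        intro l
        induction l with
        | nil => intro _ q out' _ _; simp [pvALoop]
        | cons x xs ihl =>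
          intro hl3 q out' hq hqlen
          have hx : (pre ++ suf).getD q.length ("", "") = x := by
            rw [hq]; simpa using pvGetD_append q (x :: xs) 0 ("", "")
          rw [show (x :: xs).length = xs.length + 1 from by simp, List.range'_succ,
            pvALoop_bound _ _ _ _ (by
              simp only [List.length_cons] at hqlen hl3
              omega), hx]
          have := ihl (by simp only [List.length_cons] at hl3; omega) (q ++ [x]) (out' ++ [x])
            (by simp [hq]) (by
              simp only [List.length_append, List.length_cons, List.length_nil] at hqlen ⊢
              omega)
          simp only [List.length_append, List.length_cons, List.length_nil] at this
          rw [show q.length + 1 = q.length + [x].length from by simp] at this ⊢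
          rw [this]
          simp
      rw [hall suf hs pre out rfl (by simp), pvG_short suf hs]
    · match suf, hs with
      | [x], hs => simp at hs
      | [x, y], hs => simp at hs
      | [x, y, z], hs => simp at hs
      | a :: b :: c :: d :: rest, _ =>
        have hg0 : (pre ++ (a :: b :: c :: d :: rest)).getD pre.length ("", "") = a := by
          simpa using pvGetD_append pre _ 0 ("", "")
        have hg1 : (pre ++ (a :: b :: c :: d :: rest)).getD (pre.length + 1) ("", "") = b := by
          simpa using pvGetD_append pre _ 1 ("", "")
        have hg2 : (pre ++ (a :: b :: c :: d :: rest)).getD (pre.length + 2) ("", "") = c := by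
          simpa using pvGetD_append pre _ 2 ("", "")
        have hg3 : (pre ++ (a :: b :: c :: d :: rest)).getD (pre.length + 3) ("", "") = d := by
          simpa using pvGetD_append pre _ 3 ("", "")
        have hlt : pre.length + 3 < (pre ++ (a :: b :: c :: d :: rest)).length := by
          simp only [List.length_append, List.length_cons]; omega
        have hlen4 : (a :: b :: c :: d :: rest).length = (rest.length + 3) + 1 := by
          simp only [List.length_cons]; try omega
        have hlenh : (a :: b :: c :: d :: rest).length ≤ n + 1 := h
        simp only [List.length_cons] at hlenh
        rw [hlen4, List.range'_succ]
        by_cases hp : pvPat4 a b c d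
        · rw [pvALoop_match _ _ _ _ hlt (by rw [hg0, hg1, hg2, hg3]; exact hp),
            hg0, hg1, hg2, hg3]
          rw [show rest.length + 3 = (rest.length + 2) + 1 from by omega, List.range'_succ,
            pvALoop_skip _ _ _ _ _ (by omega)]
          rw [show rest.length + 2 = (rest.length + 1) + 1 from by omega, List.range'_succ,
            pvALoop_skip _ _ _ _ _ (by omega)]
          rw [List.range'_succ, pvALoop_skip _ _ _ _ _ (by omega)]
          have e1 : pre ++ (a :: b :: c :: d :: rest) = (pre ++ [a, b, c, d]) ++ rest := by simp
          have e2 : pre.length + 1 + 1 + 1 + 1 = (pre ++ [a, b, c, d]).length := by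
            simp only [List.length_append, List.length_cons, List.length_nil]; try omega
          rw [show (3 : Nat) - 1 - 1 - 1 = 0 from rfl, e1, e2,
            ih rest (by omega) (pre ++ [a, b, c, d])]
          rw [pvG_cons4, if_pos hp]
          simp
        · rw [pvALoop_nomatch _ _ _ _ hlt (by rw [hg0, hg1, hg2, hg3]; exact hp), hg0]
          have e1 : pre ++ (a :: b :: c :: d :: rest) = (pre ++ [a]) ++ (b :: c :: d :: rest) := by
            simp
          have e2 : pre.length + 1 = (pre ++ [a]).length := by simp
          have e3 : rest.length + 3 = (b :: c :: d :: rest).length := by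
            simp only [List.length_cons]; try omega
          rw [e1, e2, e3, ih (b :: c :: d :: rest) (by simp only [List.length_cons]; try omega)
            (pre ++ [a])]
          rw [pvG_cons4, if_neg hp]
          simp

-- B's pass 2, written with an explicit running index.
def pvMark (retag : List Int) : Int → List (String × String) → List (String × String)
  | _, [] => []
  | k, x :: xs => (if retag.contains k then (x.1, "N") else x) :: pvMark retag (k + 1) xs

lemma pvMark_eq_map (retag : List Int) :
    ∀ (s : List (String × String)) (k : Int),
      (PySem.List.enumerate s k).map
          (fun jt => if retag.contains jt.1 then (jt.2.1, "N") else jt.2) = pvMark retag k s := by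
  intro s
  induction s with
  | nil => intro k; simp [pvMark, PySem.List.enumerate_nil]
  | cons x xs ih =>
    intro k
    rw [PySem.List.enumerate_cons]
    simp only [List.map_cons, pvMark]
    rw [ih]

lemma pvNotMem_contains (s : List Int) (k : Int) (hk : ∀ j ∈ s, ¬ j = k) :
    List.contains s k = false := by
  by_contra hc
  have hcc : List.contains s k = true := by
    cases h : List.contains s k with
    | true => rfl
    | false => exact absurd h hc
  exact hk _ (List.contains_iff_mem.mp hcc) rfl

-- every element of the input set survives the scan
lemma pvBScan_mono (sent : List (String × String)) (i : Nat) (r : PySem.Set Int) :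
    ∀ (j : Int), j ∈ r → j ∈ pvBScan sent i r := by
  induction i, r using pvBScan.induct sent with
  | case1 i r hlt hp ih =>
    intro j hj
    rw [pvBScan, if_pos hlt, if_pos hp]
    exact ih _ ((PySem.Set.mem_add _ _ _).mpr (Or.inl hj))
  | case2 i r hlt hp ih =>
    intro j hj
    rw [pvBScan, if_pos hlt, if_neg hp]
    exact ih _ hj
  | case3 i r hlt =>
    intro j hj
    rw [pvBScan, if_neg hlt]
    exact hj

-- everything the scan from i adds lies at position ≥ i + 2
lemma pvBScan_bound (sent : List (String × String)) (i : Nat) (r : PySem.Set Int) :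
    ∀ (j : Int), j ∈ pvBScan sent i r → j ∈ r ∨ (i : Int) + 2 ≤ j := by
  induction i, r using pvBScan.induct sent with
  | case1 i r hlt hp ih =>
    intro j hj
    rw [pvBScan, if_pos hlt, if_pos hp] at hj
    rcases ih _ hj with h | h
    · rcases (PySem.Set.mem_add _ _ _).mp h with h' | h'
      · exact Or.inl h'
      · right; omega
    · right; push_cast at h ⊢; omega
  | case2 i r hlt hp ih =>
    intro j hj
    rw [pvBScan, if_pos hlt, if_neg hp] at hj
    rcases ih _ hj with h | h
    · exact Or.inl h
    · right; push_cast at h ⊢; omega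
  | case3 i r hlt =>
    intro j hj
    rw [pvBScan, if_neg hlt] at hj
    exact Or.inl hj

lemma pvB_main (n : Nat) : ∀ (suf : List (String × String)), suf.length ≤ n →
    ∀ (pre : List (String × String)) (r : PySem.Set Int),
      (∀ j ∈ r, j < (pre.length : Int)) →
      pvMark (pvBScan (pre ++ suf) pre.length r) (pre.length : Int) suf = pvG suf := by
  induction n with
  | zero =>
    intro suf h pre r _
    rw [List.length_eq_zero_iff.mp (Nat.le_zero.mp h)]
    simp [pvMark, pvG_short]
  | succ n ih =>
    intro suf h pre r hr
    by_cases hs : suf.length ≤ 3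
    · -- short tail: the scan adds nothing and no position is marked
      have hscan : pvBScan (pre ++ suf) pre.length r = r := by
        rw [pvBScan, if_neg (by simp only [List.length_append]; omega)]
      rw [hscan]
      have hmark : ∀ (l : List (String × String)) (k : Int), (pre.length : Int) ≤ k →
          pvMark r k l = l := by
        intro l
        induction l with
        | nil => intro k _; simp [pvMark]
        | cons x xs ihl =>
          intro k hk
          simp only [pvMark]
          rw [pvNotMem_contains r k (by intro j hj hje; have := hr j hj; omega)]
          rw [ihl (k + 1) (by omega)]
          simp
      rw [hmark suf (pre.length : Int) (le_refl _), pvG_short suf hs]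
    · match suf, hs with
      | [x], hs => simp at hs
      | [x, y], hs => simp at hs
      | [x, y, z], hs => simp at hs
      | a :: b :: c :: d :: rest, _ =>
        have hg0 : (pre ++ (a :: b :: c :: d :: rest)).getD pre.length ("", "") = a := by
          simpa using pvGetD_append pre _ 0 ("", "")
        have hg1 : (pre ++ (a :: b :: c :: d :: rest)).getD (pre.length + 1) ("", "") = b := by
          simpa using pvGetD_append pre _ 1 ("", "")
        have hg2 : (pre ++ (a :: b :: c :: d :: rest)).getD (pre.length + 2) ("", "") = c := by
          simpa using pvGetD_append pre _ 2 ("", "")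
        have hg3 : (pre ++ (a :: b :: c :: d :: rest)).getD (pre.length + 3) ("", "") = d := by
          simpa using pvGetD_append pre _ 3 ("", "")
        have hlenh : (a :: b :: c :: d :: rest).length ≤ n + 1 := h
        simp only [List.length_cons] at hlenh
        rw [pvBScan, if_pos (by simp only [List.length_append, List.length_cons]; omega),
          hg0, hg1, hg2, hg3]
        by_cases hp : pvPat4 a b c d
        · rw [if_pos hp]
          set R := pvBScan (pre ++ (a :: b :: c :: d :: rest)) (pre.length + 4)
            (r.add ((pre.length : Int) + 2)) with hR
          have hbound : ∀ j ∈ R, j ∈ r.add ((pre.length : Int) + 2) ∨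
              ((pre.length : Int) + 4) + 2 ≤ j := by
            intro j hj
            rcases pvBScan_bound _ (pre.length + 4) _ j hj with h' | h'
            · exact Or.inl h'
            · right; push_cast at h' ⊢; omega
          have hmem : ∀ (m : Int), (m = (pre.length : Int) ∨ m = (pre.length : Int) + 1 ∨
              m = (pre.length : Int) + 1 + 1 + 1) → List.contains R m = false := by
            intro m hm
            apply pvNotMem_contains
            intro j hj hje
            rcases hbound j hj with h' | h'
            · rcases (PySem.Set.mem_add _ _ _).mp h' with h'' | h''
              · have := hr j h''; omega
              · omega
            · omega
          have hk2 : List.contains R ((pre.length : Int) + 1 + 1) = true := by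
            apply List.contains_iff_mem.mpr
            have : (pre.length : Int) + 1 + 1 = (pre.length : Int) + 2 := by omega
            rw [this]
            exact pvBScan_mono _ _ _ _ ((PySem.Set.mem_add _ _ _).mpr (Or.inr rfl))
          simp only [pvMark]
          rw [hmem (pre.length : Int) (by omega), hmem ((pre.length : Int) + 1) (by omega),
            hk2, hmem ((pre.length : Int) + 1 + 1 + 1) (by omega)]
          have e1 : pre ++ (a :: b :: c :: d :: rest) = (pre ++ [a, b, c, d]) ++ rest := by simp
          have e2 : (pre.length : Int) + 1 + 1 + 1 + 1 = ((pre ++ [a, b, c, d]).length : Int) := by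
            simp only [List.length_append, List.length_cons, List.length_nil]
            push_cast; omega
          have e3 : pre.length + 4 = (pre ++ [a, b, c, d]).length := by
            simp only [List.length_append, List.length_cons, List.length_nil]; try omega
          have hrecur : pvMark R ((pre.length : Int) + 1 + 1 + 1 + 1) rest = pvG rest := by
            rw [hR, e1, e2, e3]
            apply ih rest (by omega)
            intro j hj
            rcases (PySem.Set.mem_add _ _ _).mp hj with h' | h'
            · have := hr j h'
              simp only [List.length_append, List.length_cons, List.length_nil]
              push_cast; omega
            · rw [h']
              simp only [List.length_append, List.length_cons, List.length_nil]
              push_cast; omega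
          rw [hrecur, pvG_cons4, if_pos hp]
          simp
        · rw [if_neg hp]
          set R := pvBScan (pre ++ (a :: b :: c :: d :: rest)) (pre.length + 1) r with hR
          have hk0 : List.contains R ((pre.length : Nat) : Int) = false := by
            apply pvNotMem_contains
            intro j hj hje
            rcases pvBScan_bound _ (pre.length + 1) _ j hj with h' | h'
            · have := hr j h'; omega
            · push_cast at h'; omega
          rw [pvMark, hk0]
          have e1 : pre ++ (a :: b :: c :: d :: rest) = (pre ++ [a]) ++ (b :: c :: d :: rest) := by
            simp
          have e2 : (pre.length : Int) + 1 = ((pre ++ [a]).length : Int) := by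
            simp only [List.length_append, List.length_cons, List.length_nil]
            push_cast; omega
          have e2n : pre.length + 1 = (pre ++ [a]).length := by simp
          have hrecur : pvMark R ((pre.length : Int) + 1) (b :: c :: d :: rest) =
              pvG (b :: c :: d :: rest) := by
            rw [hR, e1, e2, e2n]
            apply ih (b :: c :: d :: rest) (by simp only [List.length_cons]; try omega)
            intro j hj
            have := hr j hj
            simp only [List.length_append, List.length_cons, List.length_nil]
            push_cast; omega
          rw [hrecur, pvG_cons4, if_neg hp]
          simp

-- ===== VERDICT (by name: the statement is the Claim_ definition above) =====
theorem IN_N_UNK_PUNC_Tagger_spec : Claim_equal_IN_N_UNK_PUNC_Tagger := by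
  intro sent _
  show IN_N_UNK_PUNC_Tagger sent = IN_N_UNK_PUNC_Tagger_alt sent
  have hA : IN_N_UNK_PUNC_Tagger sent = pvG sent := by
    have := pvA_loop_eq sent.length sent (le_refl _) [] []
    simpa [IN_N_UNK_PUNC_Tagger, List.range_eq_range'] using this
  have hB : IN_N_UNK_PUNC_Tagger_alt sent = pvG sent := by
    have hm := pvMark_eq_map (pvBScan sent 0 PySem.Set.empty) sent 0
    have h2 := pvB_main sent.length sent (le_refl _) [] PySem.Set.empty
      (by intro j hj; simp [PySem.Set.empty] at hj)
    simp only [List.nil_append, List.length_nil, Nat.cast_zero] at h2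
    rw [IN_N_UNK_PUNC_Tagger_alt]
    exact hm.trans h2
  rw [hA, hB]
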